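-- pv_equiv track=rewrite | github.com/RomanMykolaichuk/IT_IAZ_public | lessons/3.2/Students_works/myxa.py | separate_even_odd_numbers
-- ===== SOURCE A (Python) =====
-- def separate_even_odd_numbers(start, end):
--     even_numbers = []
--     odd_numbers = []
--
--     for num in range(start, end + 1):
--         if num % 2 == 0:
--             even_numbers.append(num)
--         else:
--             odd_numbers.append(num)
--
--     return even_numbers, odd_numbers
-- ===== SOURCE B (Python) =====
-- def separate_even_odd_numbers(start, end):
--     first_even = start if start % 2 == 0 else start + 1
--     first_odd = start if start % 2 != 0 else start + 1
--     return list(range(first_even, end + 1, 2)), list(range(first_odd, end + 1, 2))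
-- ===== Notes on version B (the rewrite author's own statement) =====
-- stated objective: idiomatic
-- what changed: Instead of scanning every integer in the range and branching on parity, B computes the first even and first odd value and builds each list directly with its own step-2 range, with no per-element test.
import Mathlib
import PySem

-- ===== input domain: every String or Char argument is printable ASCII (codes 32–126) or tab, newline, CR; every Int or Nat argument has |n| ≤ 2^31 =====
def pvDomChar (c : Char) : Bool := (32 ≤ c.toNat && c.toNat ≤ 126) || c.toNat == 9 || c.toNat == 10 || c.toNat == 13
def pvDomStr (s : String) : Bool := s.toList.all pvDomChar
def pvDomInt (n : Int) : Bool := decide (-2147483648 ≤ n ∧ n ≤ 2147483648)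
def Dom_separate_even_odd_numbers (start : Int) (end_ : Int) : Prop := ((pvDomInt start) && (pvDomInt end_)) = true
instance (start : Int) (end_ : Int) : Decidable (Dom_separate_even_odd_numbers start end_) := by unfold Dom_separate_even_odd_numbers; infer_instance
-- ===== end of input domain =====

-- B replaces A's per-element parity branch with two step-2 ranges (idiomatic; same asymptotics).

-- ===== PORT A =====
-- for num in range(start, end + 1): if num % 2 == 0: evens.append(num) else: odds.append(num)
def separate_even_odd_numbers (start : Int) (end_ : Int) : List Int × List Int :=
  (PySem.List.pyRange start (end_ + 1) 1).foldl
    (fun p num =>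
      if PySem.Int.mod num 2 = 0 then (p.1 ++ [num], p.2) else (p.1, p.2 ++ [num]))
    ([], [])

-- ===== PORT B =====
def separate_even_odd_numbers_alt (start : Int) (end_ : Int) : List Int × List Int :=
  let first_even := if PySem.Int.mod start 2 = 0 then start else start + 1
  let first_odd := if ¬ (PySem.Int.mod start 2 = 0) then start else start + 1
  (PySem.List.pyRange first_even (end_ + 1) 2, PySem.List.pyRange first_odd (end_ + 1) 2)

-- ===== PRECONDITION & SPEC =====
def Spec_separate_even_odd_numbers (start : Int) (end_ : Int) (out : List Int × List Int) : Prop := out = separate_even_odd_numbers_alt start end_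
instance (start : Int) (end_ : Int) (out : List Int × List Int) : Decidable (Spec_separate_even_odd_numbers start end_ out) := by unfold Spec_separate_even_odd_numbers; infer_instance

-- ===== CLAIM (what is proved, stated in full; the proofs are below) =====
def Claim_equal_separate_even_odd_numbers : Prop := ∀ (start : Int) (end_ : Int), Dom_separate_even_odd_numbers start end_ → Spec_separate_even_odd_numbers start end_ (separate_even_odd_numbers start end_)

-- ===== LEMMAS AND PROOFS =====

lemma pyRange_two_eq_nil (a b : Int) (h : b ≤ a) : PySem.List.pyRange a b 2 = [] := by
  rw [PySem.List.pyRange_of_pos a b (by norm_num)]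
  simp [show ¬ a < b from not_lt.2 h]

lemma pyRange_two_cons (a b : Int) (h : a < b) :
    PySem.List.pyRange a b 2 = a :: PySem.List.pyRange (a + 2) b 2 := by
  rw [PySem.List.pyRange_of_pos a b (by norm_num),
      PySem.List.pyRange_of_pos (a + 2) b (by norm_num)]
  by_cases h2 : a + 2 < b
  · have hn : ((b - a + 2 - 1) / 2).toNat = ((b - (a + 2) + 2 - 1) / 2).toNat + 1 := by omega
    rw [if_pos h, if_pos h2, hn, List.range_succ_eq_map, List.map_cons, List.map_map]
    refine congrArg₂ List.cons (by push_cast; ring) (List.map_congr_left fun k _ => ?_)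
    simp only [Function.comp_apply]
    push_cast
    ring
  · have hn : ((b - a + 2 - 1) / 2).toNat = 1 := by omega
    rw [if_pos h, if_neg h2, hn]
    simp [List.range_succ]

lemma separate_loop (n : Nat) : ∀ (a b : Int) (ev od : List Int), (b - a).toNat = n →
    (PySem.List.pyRange a b 1).foldl
      (fun p num =>
        if PySem.Int.mod num 2 = 0 then (p.1 ++ [num], p.2) else (p.1, p.2 ++ [num]))
      (ev, od) =
    (ev ++ PySem.List.pyRange (if PySem.Int.mod a 2 = 0 then a else a + 1) b 2,
     od ++ PySem.List.pyRange (if ¬ (PySem.Int.mod a 2 = 0) then a else a + 1) b 2) := by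
  induction n with
  | zero =>
    intro a b ev od hn
    have hba : b ≤ a := by omega
    rw [PySem.List.pyRange_one_eq_nil hba, List.foldl_nil,
        pyRange_two_eq_nil _ _ (by split <;> omega),
        pyRange_two_eq_nil _ _ (by split <;> omega),
        List.append_nil, List.append_nil]
  | succ n ih =>
    intro a b ev od hn
    have hab : a < b := by omega
    rw [PySem.List.pyRange_one_cons hab]
    have hmod : PySem.Int.mod a 2 = a % 2 :=
      PySem.Int.mod_eq_emod_of_pos (by norm_num)
    have hmod1 : PySem.Int.mod (a + 1) 2 = (a + 1) % 2 :=
      PySem.Int.mod_eq_emod_of_pos (by norm_num)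
    have h2 : a + 1 + 1 = a + 2 := by ring
    simp only [List.foldl_cons]
    by_cases hm : PySem.Int.mod a 2 = 0
    · have hm1 : ¬ PySem.Int.mod (a + 1) 2 = 0 := by rw [hmod1]; rw [hmod] at hm; omega
      rw [if_pos hm, ih (a + 1) b (ev ++ [a]) od (by omega),
          if_neg hm1, if_pos hm1, h2,
          if_pos hm, if_neg (not_not_intro hm),
          pyRange_two_cons a b hab]
      simp [List.append_assoc]
    · have hm1 : PySem.Int.mod (a + 1) 2 = 0 := by rw [hmod1]; rw [hmod] at hm; omega
      rw [if_neg hm, ih (a + 1) b ev (od ++ [a]) (by omega),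
          if_pos hm1, if_neg (not_not_intro hm1), h2,
          if_neg hm, if_pos hm,
          pyRange_two_cons a b hab]
      simp [List.append_assoc]

-- ===== VERDICT (by name: the statement is the Claim_ definition above) =====
theorem separate_even_odd_numbers_spec : Claim_equal_separate_even_odd_numbers := by
  intro start end_ _
  unfold Spec_separate_even_odd_numbers separate_even_odd_numbers separate_even_odd_numbers_alt
  rw [separate_loop ((end_ + 1 - start).toNat) start (end_ + 1) [] [] rfl]
  simp
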